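-- pv_equiv track=rewrite | github.com/pypi-data/pypi-mirror-379 | packages/chatline/chatline-0.4.0.tar.gz/chatline-0.4.0/chatline/display/animations/reverse_streamer.py | _detect_bracketed_message
-- ===== SOURCE A (Python) =====
-- def _detect_bracketed_message(message: str) -> bool:
--     """Detect if message contains a bracketed portion (even with external dots)."""
--     # Strip prompt prefix if present
--     text = message.strip()
--     if text.startswith("> "):
--         text = text[2:].strip()
--
--     # Check for two cases:
--     # 1. Fully enclosed brackets: [content]
--     # 2. Brackets with external dots: [content]... or [content]!!! or [content]???
--     if len(text) >= 2 and text.startswith("["):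
--         # Find the closing bracket
--         bracket_end = text.find("]")
--         if bracket_end != -1:
--             # Check if everything after the bracket is just punctuation
--             after_bracket = text[bracket_end + 1 :]
--             is_all_punctuation = all(c in ".?!" for c in after_bracket)
--             return bracket_end > 0 and is_all_punctuation
--
--     return False
-- ===== SOURCE B (Python) =====
-- def _detect_bracketed_message(message: str) -> bool:
--     """Detect if message contains a bracketed portion (even with external dots)."""
--     text = message.strip()
--     if text.startswith("> "):
--         text = text[2:].strip()
--     # single left-to-right pass: state 0 = expect '[', 1 = inside brackets,
--     # 2 = after the first ']' (only trailing punctuation allowed)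
--     state = 0
--     for c in text:
--         if state == 0:
--             if c != '[':
--                 return False
--             state = 1
--         elif state == 1:
--             if c == ']':
--                 state = 2
--         else:
--             if c not in ".?!":
--                 return False
--     return state == 2
-- ===== Notes on version B (the rewrite author's own statement) =====
-- stated objective: alternative
-- what changed: A finds the closing bracket with str.find, slices the tail and checks it with all(); B makes a single left-to-right pass with a three-state machine (expect '[', inside brackets, trailing punctuation) and never slices or searches.
import Mathlib
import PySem

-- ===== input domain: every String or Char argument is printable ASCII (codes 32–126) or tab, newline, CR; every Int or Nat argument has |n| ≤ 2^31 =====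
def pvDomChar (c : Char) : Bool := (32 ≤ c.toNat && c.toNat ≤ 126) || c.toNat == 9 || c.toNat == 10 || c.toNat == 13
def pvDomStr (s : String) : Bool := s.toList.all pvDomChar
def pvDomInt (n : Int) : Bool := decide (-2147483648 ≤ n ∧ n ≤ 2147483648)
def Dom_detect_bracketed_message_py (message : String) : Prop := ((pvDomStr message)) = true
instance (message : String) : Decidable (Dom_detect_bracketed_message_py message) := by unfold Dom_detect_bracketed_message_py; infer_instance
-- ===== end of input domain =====

-- B replaces A's find/slice/all scan by a single left-to-right three-state machine over
-- the characters (objective: alternative — a different algorithm of similar cost).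

-- ===== PORT A =====
def detect_bracketed_message_py (message : String) : Bool :=
  let text := PySem.Str.strip message
  let text := if PySem.Str.startswith text "> "
              then PySem.Str.strip (PySem.Str.slice text (some 2) none) else text
  if 2 ≤ PySem.Str.len text ∧ PySem.Str.startswith text "[" then
    let bracket_end := PySem.Str.find text "]"
    if bracket_end ≠ -1 then
      let after_bracket := PySem.Str.slice text (some (bracket_end + 1)) none
      -- 'all(c in ".?!" for c in after_bracket)': c is a 1-char string on the Python side
      let is_all_punctuation := after_bracket.toList.all
        (fun c => PySem.Str.isIn (String.ofList [c]) ".?!")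
      decide (0 < bracket_end) && is_all_punctuation
    else false
  else false

-- ===== PORT B =====
-- the 'for c in text' loop of Source B; the state is 0, 1 or 2 exactly as in Source B
def pvAltLoop : List Char → Nat → Bool
  | [], state => state == 2
  | c :: cs, 0 => if c != '[' then false else pvAltLoop cs 1
  | c :: cs, 1 => pvAltLoop cs (if c == ']' then 2 else 1)
  | c :: cs, _ => if !(c == '.' || c == '?' || c == '!') then false else pvAltLoop cs 2

def detect_bracketed_message_py_alt (message : String) : Bool :=
  let text := PySem.Str.strip message
  let text := if PySem.Str.startswith text "> "
              then PySem.Str.strip (PySem.Str.slice text (some 2) none) else text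
  pvAltLoop text.toList 0

-- ===== PRECONDITION & SPEC =====
def Spec_detect_bracketed_message_py (message : String) (out : Bool) : Prop := out = detect_bracketed_message_py_alt message
instance (message : String) (out : Bool) : Decidable (Spec_detect_bracketed_message_py message out) := by unfold Spec_detect_bracketed_message_py; infer_instance

-- ===== CLAIM (what is proved, stated in full; the proofs are below) =====
def Claim_equal_detect_bracketed_message_py : Prop := ∀ (message : String), Dom_detect_bracketed_message_py message → Spec_detect_bracketed_message_py message (detect_bracketed_message_py message)

-- ===== LEMMAS AND PROOFS =====

def pvPunct (c : Char) : Bool := c == '.' || c == '?' || c == '!'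

theorem pvBeqDecide (a b : Char) : (a == b) = decide (a = b) := by
  cases h : a == b <;> simp_all

-- Chars.find returns the least index where sub is a prefix of the remaining suffix
theorem pvFindAt (l sub : List Char) (k : Nat) (h1 : sub <+: l.drop k)
    (h2 : ∀ i, i < k → ¬ sub <+: l.drop i) : PySem.Chars.find l sub = (k : Int) := by
  have hinf : sub <:+: l := h1.isInfix.trans (List.drop_suffix k l).isInfix
  have hne : PySem.Chars.find l sub ≠ -1 := (PySem.Chars.find_ne_neg_one_iff l sub).mpr hinf
  have hz : PySem.Chars.findFrom l sub ((0 : Nat) : Int) = PySem.Chars.find l sub := by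
    rw [Nat.cast_zero]; exact PySem.Chars.findFrom_zero l sub
  have hspec := PySem.Chars.findFrom_natCast_spec l sub 0 (by omega) (by rw [hz]; exact hne)
  rw [hz] at hspec
  obtain ⟨h0, hpre, hmin⟩ := hspec
  have h0' : (0 : Int) ≤ PySem.Chars.find l sub := by exact_mod_cast h0
  set f := PySem.Chars.find l sub with hf
  have : f.toNat = k := by
    rcases Nat.lt_trichotomy f.toNat k with h | h | h
    · exact absurd hpre (h2 f.toNat h)
    · exact h
    · exact absurd h1 (hmin k (by omega) (by omega))
  omega

theorem pvSingPrefix (x : Char) (m : List Char) : [x] <+: m ↔ m.head? = some x := by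
  cases m with
  | nil => simp
  | cons b bs => simp [List.cons_prefix_cons, eq_comm]

-- cons recurrence for finding a single character
theorem pvFindCons (x c : Char) (cs : List Char) :
    PySem.Chars.find (c :: cs) [x] =
      if c = x then 0
      else if PySem.Chars.find cs [x] = -1 then -1 else PySem.Chars.find cs [x] + 1 := by
  by_cases hcx : c = x
  · subst hcx
    rw [if_pos rfl]
    exact pvFindAt (c :: cs) [c] 0 (by simp [List.cons_prefix_cons]) (by omega)
  · rw [if_neg hcx]
    by_cases hnf : PySem.Chars.find cs [x] = -1
    · rw [if_pos hnf]
      rw [PySem.Chars.find_eq_neg_one_iff] at hnf ⊢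
      rw [List.singleton_infix_iff] at hnf ⊢
      simp [hnf, Ne.symm hcx]
    · rw [if_neg hnf]
      have h0 : (0:Int) ≤ PySem.Chars.find cs [x] := by
        have := PySem.Chars.neg_one_le_find cs [x]; omega
      have hz : PySem.Chars.findFrom cs [x] ((0 : Nat) : Int) = PySem.Chars.find cs [x] := by
        rw [Nat.cast_zero]; exact PySem.Chars.findFrom_zero cs [x]
      have hspec := PySem.Chars.findFrom_natCast_spec cs [x] 0 (by omega) (by rw [hz]; exact hnf)
      rw [hz] at hspec
      obtain ⟨-, hpre, hmin⟩ := hspec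
      set f := PySem.Chars.find cs [x] with hf
      have := pvFindAt (c :: cs) [x] (f.toNat + 1)
        (by simpa using hpre)
        (by
          intro i hi hp
          match i, hp with
          | 0, hp =>
            rw [List.drop_zero, pvSingPrefix] at hp
            simp at hp
            exact hcx hp
          | (j+1), hp =>
            exact hmin j (by omega) (by omega) (by simpa using hp))
      rw [this]; omega

theorem pvAltLoop_two (cs : List Char) : pvAltLoop cs 2 = cs.all pvPunct := by
  induction cs with
  | nil => rfl
  | cons c cs ih => simp [pvAltLoop, pvPunct, ih, pvBeqDecide]

theorem pvAltLoop_one (cs : List Char) :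
    pvAltLoop cs 1 =
      if PySem.Chars.find cs [']'] = -1 then false
      else (cs.drop ((PySem.Chars.find cs [']']).toNat + 1)).all pvPunct := by
  induction cs with
  | nil => rfl
  | cons c cs ih =>
    rw [pvFindCons]
    by_cases h : c = ']'
    · subst h
      simp [pvAltLoop, pvAltLoop_two]
    · have hstep : pvAltLoop (c :: cs) 1 = pvAltLoop cs 1 := by
        simp [pvAltLoop, pvBeqDecide, h]
      rw [hstep, ih, if_neg h]
      by_cases hnf : PySem.Chars.find cs [']'] = -1
      · simp [hnf]
      · have h0 : (0:Int) ≤ PySem.Chars.find cs [']'] := by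
          have := PySem.Chars.neg_one_le_find cs [']']; omega
        simp only [if_neg hnf]
        rw [if_neg (by omega : ¬ PySem.Chars.find cs [']'] + 1 = -1)]
        have : (PySem.Chars.find cs [']'] + 1).toNat = (PySem.Chars.find cs [']']).toNat + 1 := by
          omega
        rw [this]
        simp

theorem pvIsIn_punct (c : Char) :
    PySem.Str.isIn (String.ofList [c]) ".?!" = pvPunct c := by
  rw [Bool.eq_iff_iff, PySem.Str.isIn_eq]
  have e0 : (String.ofList [c]).toList = [c] := by simp
  have e : ".?!".toList = ['.', '?', '!'] := rfl
  rw [e0, PySem.Chars.isIn_iff_infix, List.singleton_infix_iff, e]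
  show c ∈ ['.', '?', '!'] ↔ _
  simp [pvPunct]; tauto

-- the two checks agree on any text (in particular on the shared stripped preamble result)
theorem pvCore (s : String) :
    (if 2 ≤ PySem.Str.len s ∧ PySem.Str.startswith s "[" then
      let bracket_end := PySem.Str.find s "]"
      if bracket_end ≠ -1 then
        let after_bracket := PySem.Str.slice s (some (bracket_end + 1)) none
        let is_all_punctuation := after_bracket.toList.all
          (fun c => PySem.Str.isIn (String.ofList [c]) ".?!")
        decide (0 < bracket_end) && is_all_punctuation
      else false
    else false) = pvAltLoop s.toList 0 := by
  obtain ⟨l, rfl⟩ : ∃ l, s = String.ofList l := ⟨s.toList, by simp⟩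
  have etl : (String.ofList l).toList = l := by simp
  match l with
  | [] => simp [PySem.Str.len_eq, etl, pvAltLoop]
  | c :: cs =>
    by_cases hc : c = '['
    case neg =>
      rw [etl, if_neg, show pvAltLoop (c :: cs) 0 = false by simp [pvAltLoop, hc]]
      rintro ⟨-, hsw⟩
      rw [PySem.Str.startswith_eq, PySem.Chars.startswith_iff, etl] at hsw
      have : ['['] <+: c :: cs := hsw
      rw [List.cons_prefix_cons] at this
      exact hc this.1.symm
    · subst hc
      have hsw : PySem.Str.startswith (String.ofList ('[' :: cs)) "[" = true := by
        rw [PySem.Str.startswith_eq, PySem.Chars.startswith_iff, etl]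
        show ['['] <+: _
        simp [List.cons_prefix_cons]
      have hloop : pvAltLoop ('[' :: cs) 0 = pvAltLoop cs 1 := by
        simp [pvAltLoop]
      rw [etl, hloop]
      match cs with
      | [] =>
        rw [if_neg (by simp [PySem.Str.len_eq, etl])]
        rfl
      | d :: ds =>
        rw [if_pos ⟨by simp [PySem.Str.len_eq, etl]; omega, hsw⟩]
        simp only [PySem.Str.find_eq, etl]
        have efind : PySem.Chars.find ('[' :: d :: ds) "]".toList =
            if PySem.Chars.find (d :: ds) [']'] = -1 then -1
            else PySem.Chars.find (d :: ds) [']'] + 1 := by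
          rw [show "]".toList = [']'] from rfl, pvFindCons]
          simp
        rw [efind, pvAltLoop_one]
        by_cases hnf : PySem.Chars.find (d :: ds) [']'] = -1
        · simp [hnf]
        · have h0 : (0:Int) ≤ PySem.Chars.find (d :: ds) [']'] := by
            have := PySem.Chars.neg_one_le_find (d :: ds) [']']; omega
          rw [if_neg hnf, if_neg hnf]
          rw [if_pos (by omega : PySem.Chars.find (d :: ds) [']'] + 1 ≠ -1)]
          set f := PySem.Chars.find (d :: ds) [']'] with hf
          have eslice : (PySem.Str.slice (String.ofList ('[' :: d :: ds)) (some (f + 1 + 1)) none).toList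
              = List.drop (f.toNat + 1) (d :: ds) := by
            rw [PySem.Str.toList_slice, PySem.Chars.slice_eq_listSlice, etl,
              PySem.List.slice_from _ (by omega : (0:Int) ≤ f + 1 + 1)]
            have : (f + 1 + 1).toNat = f.toNat + 2 := by omega
            rw [this]
            rfl
          rw [eslice]
          have hpos : decide (0 < f + 1) = true := by simp; omega
          rw [hpos]
          simp only [Bool.true_and]
          congr 1
          funext c
          exact pvIsIn_punct c

-- ===== VERDICT (by name: the statement is the Claim_ definition above) =====
theorem detect_bracketed_message_py_spec : Claim_equal_detect_bracketed_message_py := by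
  intro message _
  unfold Spec_detect_bracketed_message_py detect_bracketed_message_py detect_bracketed_message_py_alt
  exact pvCore _
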